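-- pv_equiv track=rewrite | github.com/ZSPEC-OOS/spore | spore/app/prompt_trajectory.py | _token_type
-- ===== SOURCE A (Python) =====
-- def _token_type(tok: str) -> str:
--     t = tok.strip()
--     if not t:
--         return "whitespace"
--     if t.isalpha():
--         return "alpha"
--     if t.isnumeric():
--         return "numeric"
--     if any(ch.isalpha() for ch in t) and any(ch.isnumeric() for ch in t):
--         return "alnum"
--     return "punct/mixed"
-- ===== SOURCE B (Python) =====
-- _TABLE = {
--     "": "whitespace",
--     "a": "alpha",
--     "n": "numeric",
--     "an": "alnum",
--     "ano": "alnum",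
-- }
--
-- def _token_type(tok: str) -> str:
--     # Classify each character into a class letter, collect the SET of classes,
--     # and map the canonical (sorted) class signature through a lookup table.
--     classes = {('a' if ch.isalpha() else 'n' if ch.isnumeric() else 'o')
--                for ch in tok.strip()}
--     return _TABLE.get(''.join(sorted(classes)), "punct/mixed")
-- ===== Notes on version B (the rewrite author's own statement) =====
-- stated objective: alternative
-- what changed: Replaces A's if-chain of four whole-string predicate scans by a character-classification approach: each character is mapped to a class letter, the set of classes is collected, and the result is read from a lookup table keyed by the sorted class signature (no branch chain at all).
import Mathlib
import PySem

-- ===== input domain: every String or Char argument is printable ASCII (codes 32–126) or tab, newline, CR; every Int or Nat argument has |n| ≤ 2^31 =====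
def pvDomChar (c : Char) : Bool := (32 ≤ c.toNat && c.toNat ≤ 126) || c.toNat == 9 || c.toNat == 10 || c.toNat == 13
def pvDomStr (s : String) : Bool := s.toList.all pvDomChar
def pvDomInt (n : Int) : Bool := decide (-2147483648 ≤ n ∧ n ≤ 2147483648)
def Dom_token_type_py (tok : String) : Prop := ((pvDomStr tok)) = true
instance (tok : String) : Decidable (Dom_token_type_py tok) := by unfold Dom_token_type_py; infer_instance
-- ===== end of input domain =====

-- B replaces A's branch chain of whole-string predicate scans by mapping each character to a
-- class letter, collecting the set of classes, and reading the answer from a table keyed by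
-- the sorted class signature; same results, same cost class.

-- ===== PORT A =====
def token_type_py (tok : String) : String :=
  let t := PySem.Str.strip tok
  if t = "" then "whitespace"
  else if PySem.Str.strIsalpha t then "alpha"
  else if PySem.Str.strIsdigit t then "numeric"   -- isnumeric: exact for ASCII digits (Dom)
  else if t.toList.any PySem.Chars.isalpha && t.toList.any PySem.Chars.isdigit then "alnum"
  else "punct/mixed"

-- ===== PORT B =====
-- per-character class letter: 'a' alpha, 'n' numeric, 'o' other (isnumeric = isdigit on Dom's ASCII)
def pvClassify (ch : Char) : Char :=
  if PySem.Chars.isalpha ch then 'a'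
  else if PySem.Chars.isdigit ch then 'n'
  else 'o'

def pvTable : PySem.Dict String String :=
  PySem.Dict.ofList
    [("", "whitespace"), ("a", "alpha"), ("n", "numeric"), ("an", "alnum"), ("ano", "alnum")]

def token_type_py_alt (tok : String) : String :=
  let classes : PySem.Set Char :=
    PySem.Set.ofList ((PySem.Str.strip tok).toList.map pvClassify)
  -- ''.join(sorted(classes)): sorted over single chars, joined = String.ofList of the sorted list (exact)
  PySem.Dict.getD pvTable
    (String.ofList (PySem.List.sorted classes (fun x => x) false)) "punct/mixed"

-- ===== PRECONDITION & SPEC =====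
def Spec_token_type_py (tok : String) (out : String) : Prop := out = token_type_py_alt tok
instance (tok : String) (out : String) : Decidable (Spec_token_type_py tok out) := by unfold Spec_token_type_py; infer_instance

-- ===== CLAIM =====
def Claim_equal_token_type_py : Prop := ∀ (tok : String), Dom_token_type_py tok → Spec_token_type_py tok (token_type_py tok)

-- ===== LEMMAS AND PROOFS =====

theorem pv_digit_not_alpha (c : Char) (h : PySem.Chars.isdigit c = true) :
    PySem.Chars.isalpha c = false := by
  simp only [PySem.Chars.isdigit, PySem.Chars.isalpha, PySem.Chars.isupper, PySem.Chars.islower,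
    Bool.and_eq_true, Bool.or_eq_false_iff, decide_eq_true_eq, Bool.and_eq_false_iff,
    decide_eq_false_iff_not, Char.le_def, UInt32.le_iff_toNat_le] at *
  have h0 : ('0').val.toNat = 48 := by decide
  have h9 : ('9').val.toNat = 57 := by decide
  have hA : ('A').val.toNat = 65 := by decide
  have hZ : ('Z').val.toNat = 90 := by decide
  have ha : ('a').val.toNat = 97 := by decide
  have hz' : ('z').val.toNat = 122 := by decide
  rw [h0, h9] at h
  rw [hA, hZ, ha, hz']
  omega

theorem pv_classify_a (c : Char) : pvClassify c = 'a' ↔ PySem.Chars.isalpha c = true := by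
  unfold pvClassify; split_ifs <;> simp_all

theorem pv_classify_n (c : Char) :
    pvClassify c = 'n' ↔ PySem.Chars.isdigit c = true := by
  unfold pvClassify
  split_ifs with h1 h2
  · simp only [iff_false_intro (by decide : ('a' : Char) ≠ 'n'), false_iff]
    intro hd; rw [pv_digit_not_alpha c hd] at h1; exact Bool.false_ne_true h1
  · simp [h2]
  · simp_all

theorem pv_classify_o (c : Char) :
    pvClassify c = 'o' ↔ (PySem.Chars.isalpha c = false ∧ PySem.Chars.isdigit c = false) := by
  unfold pvClassify; split_ifs <;> simp_all

theorem pv_classify_cases (x : Char) (c : Char) (h : pvClassify c = x) :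
    x = 'a' ∨ x = 'n' ∨ x = 'o' := by
  unfold pvClassify at h; split_ifs at h <;> subst h <;> simp

theorem pv_sorted_classes (cs : List Char) :
    PySem.List.sorted (PySem.Set.ofList (cs.map pvClassify)) (fun x => x) false
    = ((if 'a' ∈ cs.map pvClassify then ['a'] else [])
        ++ (if 'n' ∈ cs.map pvClassify then ['n'] else [])
        ++ (if 'o' ∈ cs.map pvClassify then ['o'] else [])) := by
  apply PySem.List.sorted_eq_of_perm_of_pairwise_lt
  · apply (List.perm_ext_iff_of_nodup ?_ (PySem.Set.nodup_ofList _)).mpr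
    · intro x
      rw [PySem.Set.mem_ofList]
      constructor
      · intro hx
        simp only [List.mem_append] at hx
        rcases hx with (hx | hx) | hx <;>
          · split_ifs at hx with h
            · simp only [List.mem_singleton] at hx; subst hx; exact h
            · simp at hx
      · intro hx
        obtain ⟨c, hc, hcx⟩ := List.mem_map.mp hx
        rcases pv_classify_cases x c hcx with h | h | h <;> subst h <;>
          simp only [List.mem_append, List.mem_ite_nil_right, List.mem_singleton] <;> tauto
    · split_ifs <;> decide
  · split_ifs <;> decide

theorem pv_alpha_eq (t : String) (hne : t.toList.isEmpty = false) :
    PySem.Str.strIsalpha t = t.toList.all PySem.Chars.isalpha := by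
  rw [PySem.Str.strIsalpha_eq, PySem.Chars.strIsalpha, hne]
  simp

theorem pv_digit_eq (t : String) (hne : t.toList.isEmpty = false) :
    PySem.Str.strIsdigit t = t.toList.all PySem.Chars.isdigit := by
  rw [PySem.Str.strIsdigit_eq, PySem.Chars.strIsdigit, hne]
  simp

theorem pv_any_alpha (cs : List Char) :
    cs.any PySem.Chars.isalpha = true ↔ 'a' ∈ cs.map pvClassify := by
  rw [List.any_eq_true, List.mem_map]
  exact ⟨fun ⟨c, hc, h⟩ => ⟨c, hc, (pv_classify_a c).mpr h⟩,
         fun ⟨c, hc, h⟩ => ⟨c, hc, (pv_classify_a c).mp h⟩⟩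

theorem pv_any_digit (cs : List Char) :
    cs.any PySem.Chars.isdigit = true ↔ 'n' ∈ cs.map pvClassify := by
  rw [List.any_eq_true, List.mem_map]
  exact ⟨fun ⟨c, hc, h⟩ => ⟨c, hc, (pv_classify_n c).mpr h⟩,
         fun ⟨c, hc, h⟩ => ⟨c, hc, (pv_classify_n c).mp h⟩⟩

theorem pv_all_alpha (cs : List Char) :
    cs.all PySem.Chars.isalpha = true
      ↔ ('n' ∉ cs.map pvClassify ∧ 'o' ∉ cs.map pvClassify) := by
  rw [List.all_eq_true]
  constructor
  · intro h
    constructor <;> intro hm <;> obtain ⟨c, hc, hcx⟩ := List.mem_map.mp hm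
    · have hd := (pv_classify_n c).mp hcx
      have hfa := pv_digit_not_alpha c hd
      have hta := h c hc
      simp_all
    · exact Bool.false_ne_true (((pv_classify_o c).mp hcx).1 ▸ h c hc)
  · rintro ⟨hn, ho⟩ c hc
    by_contra hna
    have hfa : PySem.Chars.isalpha c = false := Bool.not_eq_true _ ▸ (by simpa using hna)
    by_cases hd : PySem.Chars.isdigit c = true
    · exact hn (List.mem_map.mpr ⟨c, hc, (pv_classify_n c).mpr hd⟩)
    · exact ho (List.mem_map.mpr ⟨c, hc, (pv_classify_o c).mpr ⟨hfa, Bool.not_eq_true _ ▸ (by simpa using hd)⟩⟩)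

theorem pv_all_digit (cs : List Char) :
    cs.all PySem.Chars.isdigit = true
      ↔ ('a' ∉ cs.map pvClassify ∧ 'o' ∉ cs.map pvClassify) := by
  rw [List.all_eq_true]
  constructor
  · intro h
    constructor <;> intro hm <;> obtain ⟨c, hc, hcx⟩ := List.mem_map.mp hm
    · have hd := h c hc
      have hfa := pv_digit_not_alpha c hd
      have hta := (pv_classify_a c).mp hcx
      simp_all
    · exact Bool.false_ne_true (((pv_classify_o c).mp hcx).2 ▸ h c hc)
  · rintro ⟨ha, ho⟩ c hc
    by_contra hnd
    have hfd : PySem.Chars.isdigit c = false := Bool.not_eq_true _ ▸ (by simpa using hnd)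
    by_cases hal : PySem.Chars.isalpha c = true
    · exact ha (List.mem_map.mpr ⟨c, hc, (pv_classify_a c).mpr hal⟩)
    · exact ho (List.mem_map.mpr ⟨c, hc, (pv_classify_o c).mpr ⟨Bool.not_eq_true _ ▸ (by simpa using hal), hfd⟩⟩)

theorem pv_nonempty_class (cs : List Char) (hne : cs ≠ []) :
    'a' ∈ cs.map pvClassify ∨ 'n' ∈ cs.map pvClassify ∨ 'o' ∈ cs.map pvClassify := by
  obtain ⟨c, cs', rfl⟩ := List.exists_cons_of_ne_nil hne
  have hm : pvClassify c ∈ (c :: cs').map pvClassify := List.mem_map.mpr ⟨c, List.mem_cons_self, rfl⟩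
  rcases pv_classify_cases (pvClassify c) c rfl with h | h | h <;> rw [h] at hm <;> tauto

-- ===== VERDICT =====
theorem token_type_py_spec : Claim_equal_token_type_py := by
  intro tok _
  unfold Spec_token_type_py token_type_py token_type_py_alt
  by_cases h : PySem.Str.strip tok = ""
  · rw [h]; rfl
  · have hne : (PySem.Str.strip tok).toList ≠ [] :=
      fun hl => h (String.toList_eq_nil_iff.mp hl)
    have hie : (PySem.Str.strip tok).toList.isEmpty = false := by
      rw [List.isEmpty_eq_false_iff]; exact hne
    simp only [if_neg h]
    rw [pv_sorted_classes, pv_alpha_eq _ hie, pv_digit_eq _ hie]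
    set cs := (PySem.Str.strip tok).toList with hcs
    by_cases hA : 'a' ∈ cs.map pvClassify <;>
    by_cases hN : 'n' ∈ cs.map pvClassify <;>
    by_cases hO : 'o' ∈ cs.map pvClassify
    · -- (a,n,o) -> "alnum" vs key "ano"
      rw [if_pos hA, if_pos hN, if_pos hO,
        if_neg (fun hall => ((pv_all_alpha cs).mp hall).1 hN),
        if_neg (fun hall => ((pv_all_digit cs).mp hall).1 hA),
        if_pos (by rw [Bool.and_eq_true, pv_any_alpha, pv_any_digit]; exact ⟨hA, hN⟩)]
      rfl
    · -- (a,n) -> "alnum" vs key "an"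
      rw [if_pos hA, if_pos hN, if_neg hO,
        if_neg (fun hall => ((pv_all_alpha cs).mp hall).1 hN),
        if_neg (fun hall => ((pv_all_digit cs).mp hall).1 hA),
        if_pos (by rw [Bool.and_eq_true, pv_any_alpha, pv_any_digit]; exact ⟨hA, hN⟩)]
      rfl
    · -- (a,o) -> "punct/mixed" vs key "ao"
      rw [if_pos hA, if_neg hN, if_pos hO,
        if_neg (fun hall => ((pv_all_alpha cs).mp hall).2 hO),
        if_neg (fun hall => ((pv_all_digit cs).mp hall).1 hA),
        if_neg (fun hand => hN ((pv_any_digit cs).mp (Bool.and_elim_right hand)))]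
      rfl
    · -- (a) -> "alpha" vs key "a"
      rw [if_pos hA, if_neg hN, if_neg hO, if_pos ((pv_all_alpha cs).mpr ⟨hN, hO⟩)]
      rfl
    · -- (n,o) -> "punct/mixed" vs key "no"
      rw [if_neg hA, if_pos hN, if_pos hO,
        if_neg (fun hall => ((pv_all_alpha cs).mp hall).1 hN),
        if_neg (fun hall => ((pv_all_digit cs).mp hall).2 hO),
        if_neg (fun hand => hA ((pv_any_alpha cs).mp (Bool.and_elim_left hand)))]
      rfl
    · -- (n) -> "numeric" vs key "n"
      rw [if_neg hA, if_pos hN, if_neg hO,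
        if_neg (fun hall => ((pv_all_alpha cs).mp hall).1 hN),
        if_pos ((pv_all_digit cs).mpr ⟨hA, hO⟩)]
      rfl
    · -- (o) -> "punct/mixed" vs key "o"
      rw [if_neg hA, if_neg hN, if_pos hO,
        if_neg (fun hall => ((pv_all_alpha cs).mp hall).2 hO),
        if_neg (fun hall => ((pv_all_digit cs).mp hall).2 hO),
        if_neg (fun hand => hA ((pv_any_alpha cs).mp (Bool.and_elim_left hand)))]
      rfl
    · -- impossible: a nonempty token has at least one character class
      rcases pv_nonempty_class cs hne with h' | h' | h'
      · exact absurd h' hA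
      · exact absurd h' hN
      · exact absurd h' hO
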